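-- pv_equiv track=rewrite | github.com/AnaClaraZoppiSerpa/diffusion-studies-supporting-codes | GA_code/crossover_functions.py | midpoint_crossover1
-- ===== SOURCE A (Python) =====
-- def midpoint_crossover1(parent1, parent2):
--     # Assuming parent1 and parent2 have the same dimensions
--
--     # Get the dimensions of the parents
--     rows = len(parent1)
--     cols = len(parent1[0])
--
--     # Calculate the midpoint index
--     midpoint = rows * cols // 2
--
--     # Flatten the parents
--     parent1_flat = [val for row in parent1 for val in row]
--     parent2_flat = [val for row in parent2 for val in row]
--
--     # Create child matrices
--     child1 = parent1_flat[:midpoint] + parent2_flat[midpoint:]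
--     child2 = parent2_flat[:midpoint] + parent1_flat[midpoint:]
--
--     # Reshape the children to match the dimensions of the parents
--     child1 = [child1[i * cols:(i + 1) * cols] for i in range(rows)]
--     child2 = [child2[i * cols:(i + 1) * cols] for i in range(rows)]
--
--     return child1, child2
-- ===== SOURCE B (Python) =====
-- def _take_flat(matrix, k):
--     # first k elements of matrix's row-major order, walking with a countdown
--     out = []
--     for row in matrix:
--         for v in row:
--             if k == 0:
--                 return out
--             out.append(v)
--             k -= 1
--     return out
--
--
-- def _drop_flat(matrix, k):
--     # matrix's row-major order with the first k elements skipped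
--     out = []
--     for row in matrix:
--         for v in row:
--             if k > 0:
--                 k -= 1
--             else:
--                 out.append(v)
--     return out
--
--
-- def _build(head, tail, rows, cols, mid):
--     # spliced stream: head's first mid elements, then tail's elements from mid on
--     spliced = _take_flat(head, mid) + _drop_flat(tail, mid)
--     total = len(spliced)
--     # gather each child row by index, clamping at the end of the stream
--     return [[spliced[t] for t in range(i * cols, min((i + 1) * cols, total))]
--             for i in range(rows)]
--
--
-- def midpoint_crossover1(parent1, parent2):
--     rows = len(parent1)
--     cols = len(parent1[0])
--     midpoint = rows * cols // 2
--     return (_build(parent1, parent2, rows, cols, midpoint),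
--             _build(parent2, parent1, rows, cols, midpoint))
-- ===== Notes on version B (the rewrite author's own statement) =====
-- stated objective: alternative
-- what changed: B never flattens the parents or slices: it extracts exactly the needed prefix/suffix of each parent's row-major order by counted traversal, and gathers each child row by index arithmetic with end clamping, replacing A's flatten-both / slice-and-concatenate / slice-reshape pipeline.
import Mathlib
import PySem

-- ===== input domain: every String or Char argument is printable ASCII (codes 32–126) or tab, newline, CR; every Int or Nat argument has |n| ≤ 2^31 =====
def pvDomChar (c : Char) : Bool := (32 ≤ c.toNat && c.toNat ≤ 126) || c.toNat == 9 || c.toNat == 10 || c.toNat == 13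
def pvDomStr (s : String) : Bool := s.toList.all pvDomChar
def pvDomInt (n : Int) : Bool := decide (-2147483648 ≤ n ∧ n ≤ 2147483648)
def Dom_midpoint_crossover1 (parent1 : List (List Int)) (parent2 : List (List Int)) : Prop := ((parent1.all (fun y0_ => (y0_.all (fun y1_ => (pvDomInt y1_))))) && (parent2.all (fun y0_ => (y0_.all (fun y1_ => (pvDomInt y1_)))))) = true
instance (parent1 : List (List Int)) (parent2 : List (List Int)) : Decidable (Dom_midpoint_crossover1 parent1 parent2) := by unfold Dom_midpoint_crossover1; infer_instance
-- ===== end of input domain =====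

-- B extracts the needed prefix/suffix of each parent's row-major order by counted
-- traversal and gathers child rows by index with end clamping, instead of A's
-- flatten / slice-concatenate / slice-reshape pipeline; objective: alternative, same cost.


-- ===== PORT A =====
-- literal transliteration of A: flatten both parents, splice the flat lists at the
-- midpoint, reshape by row slices.  parent1[0] (raises on empty parent1, excluded by
-- Pre_) is ported as headD []; the nonnegative-Nat slices xs[a:b] are drop/take
-- (exact for nonnegative bounds, cf. PySem.List.slice_natCast).
def midpoint_crossover1 (parent1 : List (List Int)) (parent2 : List (List Int)) : List (List Int) × List (List Int) :=
  let rows := parent1.length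
  let cols := (parent1.headD []).length
  let midpoint := rows * cols / 2
  let parent1_flat := parent1.flatten
  let parent2_flat := parent2.flatten
  let child1 := parent1_flat.take midpoint ++ parent2_flat.drop midpoint
  let child2 := parent2_flat.take midpoint ++ parent1_flat.drop midpoint
  ((List.range rows).map (fun i => (child1.drop (i * cols)).take cols),
   (List.range rows).map (fun i => (child2.drop (i * cols)).take cols))

-- ===== PORT B =====
-- literal transliteration of Source B.  The counted row-by-row loops of _take_flat /
-- _drop_flat become row-level recursions with the same countdown (Python's early
-- return at k == 0 appends nothing more, exactly as the k = 0 recursion does);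
-- the per-row index comprehension 'range(i*cols, min((i+1)*cols, total))' is
-- List.range' with that start and count, and spliced[t] (always in range) is getD.
def pvTakeFlat : List (List Int) → ℕ → List Int
  | [], _ => []
  | r :: t, k => r.take k ++ pvTakeFlat t (k - r.length)

def pvDropFlat : List (List Int) → ℕ → List Int
  | [], _ => []
  | r :: t, k => r.drop k ++ pvDropFlat t (k - r.length)

def pvBuild (head : List (List Int)) (tail : List (List Int)) (rows cols mid : ℕ) : List (List Int) :=
  let spliced := pvTakeFlat head mid ++ pvDropFlat tail mid
  let total := spliced.length
  (List.range rows).map (fun i =>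
    (List.range' (i * cols) (min ((i + 1) * cols) total - i * cols)).map
      (fun t => spliced.getD t 0))

def midpoint_crossover1_alt (parent1 : List (List Int)) (parent2 : List (List Int)) : List (List Int) × List (List Int) :=
  let rows := parent1.length
  let cols := (parent1.headD []).length
  let midpoint := rows * cols / 2
  (pvBuild parent1 parent2 rows cols midpoint, pvBuild parent2 parent1 rows cols midpoint)

-- ===== PRECONDITION & SPEC =====
-- Pre_ excludes only empty parent1, on which A raises IndexError at parent1[0].
def Pre_midpoint_crossover1 (parent1 : List (List Int)) (parent2 : List (List Int)) : Prop :=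
  parent1 ≠ []
instance (parent1 : List (List Int)) (parent2 : List (List Int)) : Decidable (Pre_midpoint_crossover1 parent1 parent2) := by unfold Pre_midpoint_crossover1; infer_instance

def pvWitness_midpoint_crossover1 : List (List Int) × List (List Int) :=
  ([[1, 2], [3, 4]], [[5, 6], [7, 8]])

def Spec_midpoint_crossover1 (parent1 : List (List Int)) (parent2 : List (List Int)) (out : List (List Int) × List (List Int)) : Prop := out = midpoint_crossover1_alt parent1 parent2
instance (parent1 : List (List Int)) (parent2 : List (List Int)) (out : List (List Int) × List (List Int)) : Decidable (Spec_midpoint_crossover1 parent1 parent2 out) := by unfold Spec_midpoint_crossover1; infer_instance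

-- ===== CLAIM (what is proved, stated in full; the proofs are below) =====
def Claim_equal_midpoint_crossover1 : Prop := ∀ (parent1 : List (List Int)) (parent2 : List (List Int)), Dom_midpoint_crossover1 parent1 parent2 → Pre_midpoint_crossover1 parent1 parent2 → Spec_midpoint_crossover1 parent1 parent2 (midpoint_crossover1 parent1 parent2)

-- ===== LEMMAS AND PROOFS =====

-- the counted prefix traversal is the prefix of the flattening
lemma pvTakeFlat_eq (m : List (List Int)) (k : ℕ) : pvTakeFlat m k = m.flatten.take k := by
  induction m generalizing k with
  | nil => simp [pvTakeFlat]
  | cons r t ih => simp [pvTakeFlat, List.take_append, ih]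

-- the counted skip traversal is the suffix of the flattening
lemma pvDropFlat_eq (m : List (List Int)) (k : ℕ) : pvDropFlat m k = m.flatten.drop k := by
  induction m generalizing k with
  | nil => simp [pvDropFlat]
  | cons r t ih => simp [pvDropFlat, List.drop_append, ih]

-- a drop/take window equals the index gather over its clamped index range
lemma dropTake_eq_gather (l : List Int) (a n : ℕ) :
    (l.drop a).take n = (List.range' a (min (a + n) l.length - a)).map (fun t => l.getD t 0) := by
  apply List.ext_getElem
  · simp only [List.length_take, List.length_drop, List.length_map, List.length_range']
    omega
  · intro k h1 h2
    have hk : a + k < l.length := by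
      simp only [List.length_map, List.length_range'] at h2; omega
    simp only [List.getElem_take, List.getElem_drop, List.getElem_map, List.getElem_range',
      Nat.one_mul]
    rw [List.getD_eq_getElem l 0 hk]

-- one of A's spliced-and-reshaped children equals B's pvBuild of the same parents
lemma build_eq (head tail : List (List Int)) (rows cols mid : ℕ) :
    (List.range rows).map
        (fun i => (((head.flatten.take mid ++ tail.flatten.drop mid)).drop (i * cols)).take cols)
      = pvBuild head tail rows cols mid := by
  unfold pvBuild
  simp only [pvTakeFlat_eq, pvDropFlat_eq]
  apply List.map_congr_left
  intro i _
  rw [dropTake_eq_gather]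
  have : i * cols + cols = (i + 1) * cols := by ring
  rw [this]

-- ===== VERDICT (by name: the statement is the Claim_ definition above) =====
theorem midpoint_crossover1_spec : Claim_equal_midpoint_crossover1 := by
  intro p1 p2 _ _
  unfold Spec_midpoint_crossover1 midpoint_crossover1 midpoint_crossover1_alt
  exact Prod.ext (build_eq p1 p2 _ _ _) (build_eq p2 p1 _ _ _)
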